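-- pv_equiv track=rewrite | github.com/cobeylab/isotype_phylogenetics | src/test_singleton_random.py | count_isotypes
-- ===== SOURCE A (Python) =====
-- def count_isotypes(isotype_csv):
--
-- 	numIgG = 0
-- 	numIgA = 0
-- 	cloneSize = 0
-- 	for sequence in isotype_csv:
-- 		cloneSize += 1
-- 		isotype = sequence['isotype'][0:3]
-- 		if isotype == 'IgG':
-- 			numIgG += 1
-- 		elif isotype == 'IgA':
-- 			numIgA += 1
--
-- 	effSize = numIgG + numIgA
--
-- 	return numIgG, numIgA, effSize, cloneSize
-- ===== SOURCE B (Python) =====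
-- def count_isotypes(isotype_csv):
--     # Staged passes: extract all 3-char prefixes once, then count each target with list.count.
--     prefixes = [sequence['isotype'][0:3] for sequence in isotype_csv]
--     numIgG = prefixes.count('IgG')
--     numIgA = prefixes.count('IgA')
--     return numIgG, numIgA, numIgG + numIgA, len(prefixes)
-- ===== Notes on version B (the rewrite author's own statement) =====
-- stated objective: simpler
-- what changed: B replaces the single branching loop with staged passes: it first materialises the list of 3-char isotype prefixes, then obtains numIgG and numIgA via list.count and cloneSize via len, with no if/elif dispatch or hand-maintained counters.
import Mathlib
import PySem

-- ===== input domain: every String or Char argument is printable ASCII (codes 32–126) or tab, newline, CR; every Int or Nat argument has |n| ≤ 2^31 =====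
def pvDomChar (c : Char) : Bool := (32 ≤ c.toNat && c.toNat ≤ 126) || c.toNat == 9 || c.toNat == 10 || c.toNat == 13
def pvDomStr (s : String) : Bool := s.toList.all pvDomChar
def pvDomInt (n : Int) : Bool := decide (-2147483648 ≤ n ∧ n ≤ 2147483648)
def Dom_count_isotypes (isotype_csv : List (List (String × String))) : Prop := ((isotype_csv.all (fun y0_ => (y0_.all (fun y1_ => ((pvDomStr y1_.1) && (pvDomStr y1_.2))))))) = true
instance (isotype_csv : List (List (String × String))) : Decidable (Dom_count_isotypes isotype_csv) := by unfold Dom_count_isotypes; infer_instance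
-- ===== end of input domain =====

-- ===== PORT A =====
-- one-line objective: B stages the work — extract all prefixes once, then count with list.count/len — instead of one branching loop with counters (simpler)
def pvKey (row : List (String × String)) : String :=
  PySem.Str.slice (((PySem.Dict.mk row).get? "isotype").getD "") (some 0) (some 3)

def count_isotypes (isotype_csv : List (List (String × String))) : Int × Int × Int × Int :=
  let st := isotype_csv.foldl (fun (st : Int × Int × Int) sequence =>
    let cloneSize := st.2.2 + 1
    let isotype := pvKey sequence
    if isotype = "IgG" then (st.1 + 1, st.2.1, cloneSize)
    else if isotype = "IgA" then (st.1, st.2.1 + 1, cloneSize)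
    else (st.1, st.2.1, cloneSize)) (0, 0, 0)
  (st.1, st.2.1, st.1 + st.2.1, st.2.2)

-- ===== PORT B =====
def count_isotypes_alt (isotype_csv : List (List (String × String))) : Int × Int × Int × Int :=
  let prefixes := isotype_csv.map pvKey
  let numIgG : Int := PySem.List.count prefixes "IgG"
  let numIgA : Int := PySem.List.count prefixes "IgA"
  (numIgG, numIgA, numIgG + numIgA, (prefixes.length : Int))

-- ===== PRECONDITION & SPEC =====
-- Pre_ excludes rows without an 'isotype' key, on which the Python raises KeyError.
def Pre_count_isotypes (isotype_csv : List (List (String × String))) : Prop :=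
  isotype_csv.all (fun row => (PySem.Dict.mk row).contains "isotype") = true
instance (isotype_csv : List (List (String × String))) : Decidable (Pre_count_isotypes isotype_csv) := by
  unfold Pre_count_isotypes; infer_instance
def pvWitness_count_isotypes : (List (List (String × String))) :=
  [[("isotype", "IgG1")], [("isotype", "IgA")], [("isotype", "IgM")]]
def Spec_count_isotypes (isotype_csv : List (List (String × String))) (out : Int × Int × Int × Int) : Prop := out = count_isotypes_alt isotype_csv
instance (isotype_csv : List (List (String × String))) (out : Int × Int × Int × Int) : Decidable (Spec_count_isotypes isotype_csv out) := by unfold Spec_count_isotypes; infer_instance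

-- ===== CLAIM (what is proved, stated in full; the proofs are below) =====
def Claim_equal_count_isotypes : Prop := ∀ (isotype_csv : List (List (String × String))), Dom_count_isotypes isotype_csv → Pre_count_isotypes isotype_csv → Spec_count_isotypes isotype_csv (count_isotypes isotype_csv)

-- ===== LEMMAS AND PROOFS =====

lemma count_isotypes_eq (csv : List (List (String × String))) :
    count_isotypes csv =
      (((csv.map pvKey).count "IgG" : Int), ((csv.map pvKey).count "IgA" : Int),
       ((csv.map pvKey).count "IgG" : Int) + ((csv.map pvKey).count "IgA" : Int),
       (csv.length : Int)) := by
  have main : ∀ (l : List (List (String × String))) (g a n : Int),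
      l.foldl (fun (st : Int × Int × Int) sequence =>
        let cloneSize := st.2.2 + 1
        let isotype := pvKey sequence
        if isotype = "IgG" then (st.1 + 1, st.2.1, cloneSize)
        else if isotype = "IgA" then (st.1, st.2.1 + 1, cloneSize)
        else (st.1, st.2.1, cloneSize)) (g, a, n) =
      (g + ((l.map pvKey).count "IgG" : Int), a + ((l.map pvKey).count "IgA" : Int),
       n + (l.length : Int)) := by
    intro l
    induction l with
    | nil => intro g a n; simp
    | cons hd tl ih =>
      intro g a n
      simp only [List.foldl_cons, List.map_cons, List.length_cons]
      by_cases h1 : pvKey hd = "IgG"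
      · simp [h1, ih]
        constructor <;> ring
      · by_cases h2 : pvKey hd = "IgA"
        · simp [h2, ih]
          constructor <;> ring
        · simp [h1, h2, ih]
          ring
  simp only [count_isotypes, main]
  simp

-- ===== VERDICT (by name: the statement is the Claim_ definition above) =====
theorem count_isotypes_spec : Claim_equal_count_isotypes := by
  intro csv _ _
  unfold Spec_count_isotypes count_isotypes_alt
  rw [count_isotypes_eq]
  simp [PySem.List.count_eq]
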